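-- pv_equiv track=rewrite | github.com/beauvilerobed/data-structures-and-algorithms | greedy-MST-dynamic-programming/assignment2/clustering.py | hamming_possibilies
-- ===== SOURCE A (Python) =====
-- import itertools
-- import copy
--
-- def switch(bit):
--     if bit == 1:
--         return 0
--     return 1
--
-- def hamming_possibilies(vertex, distance):
--     coordinates = itertools.combinations(range(len(vertex)), distance)
--     vertex = [letter for letter in vertex]
--     vertices = list()
--     for coordinate in coordinates:
--         new_vertex = copy.copy(vertex)
--         for index in coordinate:
--             bit = int(vertex[index])
--             new_vertex[index] = str(switch(bit))
--         new_vertex = "".join(new_vertex)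
--         vertices.append(new_vertex)
--
--     return vertices
-- ===== SOURCE B (Python) =====
-- def hamming_possibilies(vertex, distance):
--     n = len(vertex)
--     results = []
--     stack = [(0, distance, "")]
--     while stack:
--         pos, remaining, acc = stack.pop()
--         if remaining == 0:
--             results.append(acc + vertex[pos:])
--             continue
--         if n - pos < remaining:
--             continue
--         bit = int(vertex[pos])
--         stack.append((pos + 1, remaining, acc + vertex[pos]))
--         stack.append((pos + 1, remaining - 1, acc + ('0' if bit == 1 else '1')))
--     return results
-- ===== Notes on version B (the rewrite author's own statement) =====
-- stated objective: alternative
-- what changed: Replaces itertools.combinations over index tuples plus a per-combination list copy/rewrite pass with a single explicit-stack DFS over the string positions that builds each output string once, left to right.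
import Mathlib
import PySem

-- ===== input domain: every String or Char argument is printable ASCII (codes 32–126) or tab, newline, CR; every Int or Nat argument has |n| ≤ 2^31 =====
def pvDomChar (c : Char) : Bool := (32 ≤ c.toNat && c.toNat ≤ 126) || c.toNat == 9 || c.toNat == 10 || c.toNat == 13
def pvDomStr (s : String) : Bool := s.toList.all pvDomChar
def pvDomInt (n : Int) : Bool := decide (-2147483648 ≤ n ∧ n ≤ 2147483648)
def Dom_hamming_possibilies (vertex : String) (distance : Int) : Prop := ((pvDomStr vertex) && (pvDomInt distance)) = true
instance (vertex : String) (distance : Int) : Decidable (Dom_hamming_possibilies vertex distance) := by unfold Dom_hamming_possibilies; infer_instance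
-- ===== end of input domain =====

-- B replaces A's itertools.combinations-of-indices + per-combination copy/rewrite pass with a single
-- explicit-stack DFS over the positions of the vertex that builds each output string once, left to right
-- (objective: alternative decomposition; same outputs in the same order).

-- shared flip helper: str(switch(int(c))) in A resp. ('0' if int(c) == 1 else '1') in B.
-- int(c) on a single char succeeds exactly on digits; the none case (Python raises ValueError there)
-- is excluded by Pre_ and mapped to '1' here like any non-1 value.
def pyFlip (c : Char) : Char :=
  if PySem.Int.ofChars? [c] = some 1 then '0' else '1'

-- ===== PORT A =====
-- itertools.combinations(range(n), k): the k-subsets of the index list, lexicographic (hand port, exact)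
def combosA : Nat → List Nat → List (List Nat)
  | 0, _ => [[]]
  | _ + 1, [] => []
  | k + 1, x :: xs => ((combosA k xs).map (fun c => x :: c)) ++ combosA (k + 1) xs

-- the inner 'for index in coordinate' loop: new_vertex[index] = str(switch(int(vertex[index])))
def applyFlips (orig : List Char) (cur : List Char) (coord : List Nat) : List Char :=
  coord.foldl (fun nv i => nv.set i (pyFlip (orig.getD i ' '))) cur

def hamming_possibilies (vertex : String) (distance : Int) : List String :=
  (combosA distance.toNat (List.range vertex.toList.length)).map
    (fun coord => String.mk (applyFlips vertex.toList vertex.toList coord))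

-- ===== PORT B =====
-- stack frame = (vertex[pos:], remaining, acc); pos is represented by the remaining suffix.
def pvMeasureB (st : List (List Char × Int × List Char)) : Nat :=
  (st.map (fun f => 3 ^ f.1.length)).sum

def loopB : List (List Char × Int × List Char) → List (List Char) → List (List Char)
  | [], results => results
  | (rest, remaining, acc) :: stack, results =>
    if remaining = 0 then loopB stack (results ++ [acc ++ rest])
    else if (rest.length : Int) < remaining then loopB stack results
    else
      match rest with
      | [] => loopB stack results  -- Python raises IndexError here (only when remaining < 0); outside Pre_
      | c :: rest' =>
          loopB ((rest', remaining - 1, acc ++ [pyFlip c]) :: (rest', remaining, acc ++ [c]) :: stack) results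
termination_by st _ => pvMeasureB st
decreasing_by
  · have : 0 < 3 ^ rest.length := Nat.pow_pos (by omega)
    simp only [pvMeasureB, List.map_cons, List.sum_cons]; omega
  · have : 0 < 3 ^ rest.length := Nat.pow_pos (by omega)
    simp only [pvMeasureB, List.map_cons, List.sum_cons]; omega
  · simp only [pvMeasureB, List.map_cons, List.sum_cons, List.length_nil, pow_zero]; omega
  · have : 0 < 3 ^ rest'.length := Nat.pow_pos (by omega)
    simp only [pvMeasureB, List.map_cons, List.sum_cons, List.length_cons, pow_succ]; omega

def hamming_possibilies_alt (vertex : String) (distance : Int) : List String :=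
  (loopB [(vertex.toList, distance, [])] []).map String.mk

-- ===== PRECONDITION & SPEC =====
-- Pre_ excludes exactly the inputs where Python A raises (and Python B raises there too): negative
-- distance (ValueError from combinations), and 1 ≤ distance ≤ len(vertex) with a non-digit character
-- (ValueError from int(...)).
def Pre_hamming_possibilies (vertex : String) (distance : Int) : Prop :=
  0 ≤ distance ∧
    (distance = 0 ∨ (vertex.toList.length : Int) < distance ∨ vertex.toList.all Char.isDigit = true)

instance (vertex : String) (distance : Int) : Decidable (Pre_hamming_possibilies vertex distance) := by
  unfold Pre_hamming_possibilies; infer_instance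

def pvWitness_hamming_possibilies : String × Int := ("1101", 2)

def Spec_hamming_possibilies (vertex : String) (distance : Int) (out : List String) : Prop := out = hamming_possibilies_alt vertex distance
instance (vertex : String) (distance : Int) (out : List String) : Decidable (Spec_hamming_possibilies vertex distance out) := by unfold Spec_hamming_possibilies; infer_instance

-- ===== CLAIM (what is proved, stated in full; the proofs are below) =====
def Claim_equal_hamming_possibilies : Prop := ∀ (vertex : String) (distance : Int), Dom_hamming_possibilies vertex distance → Pre_hamming_possibilies vertex distance → Spec_hamming_possibilies vertex distance (hamming_possibilies vertex distance)

-- ===== LEMMAS AND PROOFS =====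

-- common intermediate: F cs k = the k-flip variants of cs, flipped positions in lexicographic order
def F : List Char → Nat → List (List Char)
  | cs, 0 => [cs]
  | [], _ + 1 => []
  | c :: cs, k + 1 =>
      ((F cs k).map (fun l => pyFlip c :: l)) ++ ((F cs (k + 1)).map (fun l => c :: l))

lemma F_of_short : ∀ (cs : List Char) (k : Nat), cs.length < k → F cs k = [] := by
  intro cs
  induction cs with
  | nil =>
    intro k h
    cases k with
    | zero => omega
    | succ k => simp [F]
  | cons c cs ih =>
    intro k h
    cases k with
    | zero => omega
    | succ k =>
      simp only [F]
      rw [ih k (by simp at h; omega), ih (k + 1) (by simp at h; omega)]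
      simp

-- ----- A-side: combinations + flip pass = F -----
lemma set_append_cons (pre : List Char) (c x : Char) (suf : List Char) :
    (pre ++ c :: suf).set pre.length x = pre ++ x :: suf := by
  induction pre with
  | nil => simp
  | cons p pre ih => simpa using ih

lemma getD_of_drop (orig : List Char) (s : Nat) (c : Char) (suf : List Char)
    (h : orig.drop s = c :: suf) : orig.getD s ' ' = c := by
  have h1 : orig[s]? = some c := by
    have h2 : (orig.drop s)[0]? = orig[s + 0]? := List.getElem?_drop
    simp [h] at h2
    exact h2.symm
  simp [List.getD_eq_getElem?_getD, h1]

lemma combosA_applyFlips (suf : List Char) : ∀ (k : Nat) (curPre orig : List Char),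
    orig.drop curPre.length = suf →
    (combosA k (List.range' curPre.length suf.length)).map
        (fun coord => applyFlips orig (curPre ++ suf) coord)
      = (F suf k).map (fun l => curPre ++ l) := by
  induction suf with
  | nil =>
    intro k curPre orig _
    cases k with
    | zero => simp [combosA, F, applyFlips]
    | succ k => simp [combosA, F]
  | cons c suf' ih =>
    intro k curPre orig h
    cases k with
    | zero => simp [combosA, F, applyFlips]
    | succ k =>
      have hget : orig.getD curPre.length ' ' = c := getD_of_drop orig _ c suf' h
      have hdrop' : ∀ x : Char, orig.drop (curPre ++ [x]).length = suf' := by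
        intro x
        have h2 : (orig.drop curPre.length).drop 1 = suf' := by rw [h]; rfl
        rw [List.drop_drop] at h2
        simpa [Nat.add_comm] using h2
      have hstep : ∀ coord, applyFlips orig (curPre ++ c :: suf') (curPre.length :: coord)
          = applyFlips orig ((curPre ++ [pyFlip c]) ++ suf') coord := by
        intro coord
        simp only [applyFlips, List.foldl_cons, hget, set_append_cons]
        congr 1
        simp
      show (combosA (k + 1) (List.range' curPre.length (suf'.length + 1))).map
            (fun coord => applyFlips orig (curPre ++ c :: suf') coord)
          = (F (c :: suf') (k + 1)).map (fun l => curPre ++ l)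
      rw [List.range'_succ]
      have e1 : combosA (k + 1) (curPre.length :: List.range' (curPre.length + 1) suf'.length)
          = ((combosA k (List.range' (curPre.length + 1) suf'.length)).map
              (fun co => curPre.length :: co))
            ++ combosA (k + 1) (List.range' (curPre.length + 1) suf'.length) := rfl
      rw [e1, List.map_append, List.map_map]
      have e2 : ((fun coord => applyFlips orig (curPre ++ c :: suf') coord)
            ∘ fun co => curPre.length :: co)
          = fun co => applyFlips orig ((curPre ++ [pyFlip c]) ++ suf') co := by
        funext co; exact hstep co
      rw [e2]
      have ihA := ih k (curPre ++ [pyFlip c]) orig (hdrop' _)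
      have ihB := ih (k + 1) (curPre ++ [c]) orig (hdrop' _)
      simp only [List.length_append, List.length_cons, List.length_nil, Nat.zero_add] at ihA ihB
      rw [ihA]
      have e4 : (fun coord => applyFlips orig (curPre ++ c :: suf') coord)
          = fun coord => applyFlips orig ((curPre ++ [c]) ++ suf') coord := by
        simp
      rw [e4, ihB]
      show _ = (((F suf' k).map (fun l => pyFlip c :: l))
          ++ ((F suf' (k + 1)).map (fun l => c :: l))).map (fun l => curPre ++ l)
      simp [List.map_map, Function.comp_def]

lemma A_eq_F (vertex : String) (distance : Int) :
    hamming_possibilies vertex distance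
      = (F vertex.toList distance.toNat).map String.mk := by
  unfold hamming_possibilies
  have h0 : vertex.toList.drop ([] : List Char).length = vertex.toList := by simp
  have hmain := combosA_applyFlips vertex.toList distance.toNat [] vertex.toList h0
  simp only [List.length_nil, List.nil_append] at hmain
  rw [List.range_eq_range']
  calc (combosA distance.toNat (List.range' 0 vertex.toList.length)).map
        (fun coord => String.mk (applyFlips vertex.toList vertex.toList coord))
      = ((combosA distance.toNat (List.range' 0 vertex.toList.length)).map
          (fun coord => applyFlips vertex.toList vertex.toList coord)).map String.mk := by
        simp [List.map_map, Function.comp_def]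
    _ = ((F vertex.toList distance.toNat).map (fun l => l)).map String.mk := by rw [hmain]
    _ = (F vertex.toList distance.toNat).map String.mk := by simp

-- ----- B-side: explicit-stack DFS = F -----
lemma loopB_eq : ∀ (stack : List (List Char × Int × List Char)) (results : List (List Char)),
    (∀ f ∈ stack, 0 ≤ f.2.1) →
    loopB stack results
      = results ++ stack.flatMap (fun f => (F f.1 f.2.1.toNat).map (fun l => f.2.2 ++ l)) := by
  intro stack results
  induction stack, results using loopB.induct with
  | case1 results => simp [loopB]
  | case2 rest acc stack results ih =>
    intro hinv
    rw [loopB.eq_def]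
    simp only [if_pos (rfl : (0:Int) = 0)]
    rw [ih (fun f hf => hinv f (List.mem_cons_of_mem _ hf))]
    simp [F]
  | case3 rest remaining acc stack results hrem hlen ih =>
    intro hinv
    rw [loopB.eq_def]
    simp only [hrem, if_false, if_pos hlen]
    rw [ih (fun f hf => hinv f (List.mem_cons_of_mem _ hf))]
    have h0 : 0 ≤ remaining := hinv _ List.mem_cons_self
    have hshort : rest.length < remaining.toNat := by omega
    simp [F_of_short rest _ hshort]
  | case4 remaining acc stack results hrem hlen ih =>
    intro hinv
    exfalso
    have h0 : 0 ≤ remaining := hinv _ List.mem_cons_self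
    simp at hlen
    omega
  | case5 remaining acc stack results hrem c rest' hlen ih =>
    intro hinv
    have h0 : 0 ≤ remaining := hinv _ List.mem_cons_self
    rw [loopB.eq_def]
    simp only [hrem, if_false, if_neg hlen]
    rw [ih (by
      intro f hf
      simp only [List.mem_cons] at hf
      rcases hf with h | h | h
      · subst h; simp; omega
      · subst h; simpa using h0
      · exact hinv f (List.mem_cons_of_mem _ h))]
    have hk : remaining.toNat = (remaining - 1).toNat + 1 := by
      have : remaining ≠ 0 := hrem
      omega
    have hF : F (c :: rest') remaining.toNat
        = ((F rest' (remaining - 1).toNat).map (fun l => pyFlip c :: l))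
          ++ ((F rest' remaining.toNat).map (fun l => c :: l)) := by
      rw [hk]; rfl
    simp only [List.flatMap_cons, hF]
    simp [List.map_map, Function.comp_def, List.append_assoc]

lemma B_eq_F (vertex : String) (distance : Int) (h : 0 ≤ distance) :
    hamming_possibilies_alt vertex distance
      = (F vertex.toList distance.toNat).map String.mk := by
  unfold hamming_possibilies_alt
  rw [loopB_eq [(vertex.toList, distance, [])] [] (by simpa using h)]
  simp

-- ===== VERDICT (by name: the statement is the Claim_ definition above) =====
theorem hamming_possibilies_spec : Claim_equal_hamming_possibilies := by
  intro vertex distance _ hpre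
  unfold Spec_hamming_possibilies
  rw [A_eq_F, B_eq_F vertex distance hpre.1]
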